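-- pv_equiv track=rewrite | github.com/yongunt/problems | prison_break/prison_break.py | freed_prisoners
-- ===== SOURCE A (Python) =====
-- def change_locks(cells:list) -> list:
--     for i in range(len(cells)):
--         if cells[i] == 0: cells[i] = 1
--         else: cells[i] = 0
--     return cells
--
-- def freed_prisoners(cells:list) -> int:
--     if cells[0] == 0: return 0
--
--     ans = 0
--
--     for i in range(1, len(cells)):
--         if cells[i] == 1:
--             ans += 1
--             cells = change_locks(cells)
--
--     return ans
-- ===== SOURCE B (Python) =====
-- def freed_prisoners(cells: list) -> int:
--     # One pass with flip parity instead of rewriting the array on every release.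
--     # (A mutates its argument in place; this matches A's return value only.)
--     if cells[0] == 0:
--         return 0
--     rest = cells[1:]
--     # Before any toggle, only a cell holding exactly 1 releases a prisoner.
--     try:
--         first = rest.index(1)
--     except ValueError:
--         return 0
--     ans = 1
--     for v in rest[first + 1:]:
--         # Each toggle turns zeros into ones and everything else into zeros,
--         # so after the first toggle only zero-ness and the parity of the
--         # number of toggles so far decide whether a cell reads 1.
--         if (v != 0) == (ans % 2 == 0):
--             ans += 1
--     return ans
-- ===== Notes on version B (the rewrite author's own statement) =====
-- stated objective: alternative
-- what changed: Instead of rewriting the whole cell array on every freed prisoner, B finds the first releasing cell with rest.index(1) and then makes one pass deciding each later cell from its zero-ness and the parity of releases so far; Pre_ excludes only the empty list, on which A raises IndexError.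
import Mathlib
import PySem

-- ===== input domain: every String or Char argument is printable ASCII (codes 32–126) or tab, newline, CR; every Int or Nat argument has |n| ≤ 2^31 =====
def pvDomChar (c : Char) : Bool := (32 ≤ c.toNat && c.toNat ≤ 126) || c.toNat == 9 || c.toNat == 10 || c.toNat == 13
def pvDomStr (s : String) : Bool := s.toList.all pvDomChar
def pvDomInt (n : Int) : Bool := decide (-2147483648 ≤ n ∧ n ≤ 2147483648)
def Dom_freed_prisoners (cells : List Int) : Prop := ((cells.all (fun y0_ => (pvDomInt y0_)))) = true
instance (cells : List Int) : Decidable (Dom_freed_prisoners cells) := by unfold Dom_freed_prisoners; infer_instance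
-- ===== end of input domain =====

-- B replaces A's repeated whole-array rewriting by finding the first releasing cell
-- and then one parity pass (return-value equivalence only: A mutates its argument in place).


-- ===== PORT A =====
-- change_locks: rewrite every cell (0 -> 1, anything else -> 0)
def change_locks : List Int → List Int
  | [] => []
  | v :: r => (if v = 0 then (1 : Int) else 0) :: change_locks r

def freed_prisoners (cells : List Int) : Int :=
  if PySem.List.pyGetD cells 0 0 = 0 then 0
  else
    ((PySem.List.pyRange 1 (PySem.List.len cells) 1).foldl
      (fun (s : Int × List Int) i =>
        if PySem.List.pyGetD s.2 i 0 = 1 then (s.1 + 1, change_locks s.2) else s)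
      (0, cells)).1

-- ===== PORT B =====
def freed_prisoners_alt (cells : List Int) : Int :=
  if PySem.List.pyGetD cells 0 0 = 0 then 0
  else
    match PySem.List.index? (cells.drop 1) 1 with   -- rest = cells[1:]; rest.index(1)
    | none => 0
    | some first =>
      ((cells.drop 1).drop (first + 1)).foldl       -- rest[first+1:]
        (fun (ans : Int) v =>
          if ((v ≠ 0) ↔ PySem.Int.mod ans 2 = 0) then ans + 1 else ans)
        1

-- ===== PRECONDITION & SPEC =====
-- A raises IndexError on the empty list (cells[0]); excluded.
def Pre_freed_prisoners (cells : List Int) : Prop := cells ≠ []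
instance (cells : List Int) : Decidable (Pre_freed_prisoners cells) := by unfold Pre_freed_prisoners; infer_instance
def pvWitness_freed_prisoners : List Int := ([1, 1, 0, 1])

def Spec_freed_prisoners (cells : List Int) (out : Int) : Prop := out = freed_prisoners_alt cells
instance (cells : List Int) (out : Int) : Decidable (Spec_freed_prisoners cells out) := by unfold Spec_freed_prisoners; infer_instance

-- ===== CLAIM (what is proved, stated in full; the proofs are below) =====
def Claim_equal_freed_prisoners : Prop := ∀ (cells : List Int), Dom_freed_prisoners cells → Pre_freed_prisoners cells → Spec_freed_prisoners cells (freed_prisoners cells)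

-- ===== LEMMAS AND PROOFS =====

-- pointwise flip
def pflip (v : Int) : Int := if v = 0 then 1 else 0

lemma change_locks_length (l : List Int) : (change_locks l).length = l.length := by
  induction l with
  | nil => rfl
  | cons v r ih => simp [change_locks, ih]

lemma change_locks_getD (l : List Int) (i : Nat) (h : i < l.length) :
    (change_locks l).getD i 0 = pflip (l.getD i 0) := by
  induction l generalizing i with
  | nil => simp at h
  | cons v r ih =>
    cases i with
    | zero => rfl
    | succ j => simpa [change_locks, List.getD] using ih j (by simpa using h)

lemma iter_length (k : Nat) (l : List Int) :
    (change_locks^[k] l).length = l.length := by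
  induction k with
  | zero => rfl
  | succ j ih =>
    rw [Function.iterate_succ_apply', change_locks_length, ih]

lemma iter_getD (k : Nat) (l : List Int) (i : Nat) (h : i < l.length) :
    (change_locks^[k] l).getD i 0 = pflip^[k] (l.getD i 0) := by
  induction k with
  | zero => rfl
  | succ j ih =>
    rw [Function.iterate_succ_apply', Function.iterate_succ_apply',
      change_locks_getD _ i (by rw [iter_length]; exact h), ih]

lemma pflip_pflip (v : Int) : pflip (pflip v) = if v = 0 then 0 else 1 := by
  by_cases h : v = 0 <;> simp [pflip, h]

lemma pflip_iter (k : Nat) (v : Int) :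
    pflip^[k + 1] v = if k % 2 = 0 then pflip v else (if v = 0 then 0 else 1) := by
  induction k with
  | zero => simp
  | succ j ih =>
    rw [Function.iterate_succ_apply', ih]
    rcases Nat.even_or_odd j with hj | hj
    · have h0 : j % 2 = 0 := Nat.even_iff.mp hj
      have h1 : (j + 1) % 2 = 1 := by omega
      simp [h0, h1, pflip_pflip]
    · have h0 : j % 2 = 1 := Nat.odd_iff.mp hj
      have h1 : (j + 1) % 2 = 0 := by omega
      by_cases hv : v = 0 <;> simp [h0, h1, hv, pflip]

-- after at least one flip, "cell reads 1" is exactly B's zero-ness / parity test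
lemma hit1_iff (k : Nat) (v : Int) :
    (pflip^[k + 1] v = 1) ↔ ((v ≠ 0) ↔ PySem.Int.mod ((k + 1 : Nat) : Int) 2 = 0) := by
  have hm : PySem.Int.mod ((k + 1 : Nat) : Int) 2 = (((k + 1) % 2 : Nat) : Int) := by
    exact_mod_cast PySem.Int.mod_natCast (k + 1) 2
  rw [pflip_iter, hm]
  rcases Nat.even_or_odd k with hk | hk
  · have h0 : k % 2 = 0 := Nat.even_iff.mp hk
    have h1 : (k + 1) % 2 = 1 := by omega
    rw [h0, h1]
    by_cases hv : v = 0 <;> simp [hv, pflip]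
  · have h0 : k % 2 = 1 := Nat.odd_iff.mp hk
    have h1 : (k + 1) % 2 = 0 := by omega
    rw [h0, h1]
    by_cases hv : v = 0 <;> simp [hv]

-- phase 2: once at least one prisoner is freed, A's loop equals B's parity pass
lemma loop2_eq (cells : List Int) (m : Nat) : ∀ (i k : Nat), i + m = cells.length →
    ((PySem.List.pyRange (i : Int) ((cells.length : Nat) : Int) 1).foldl
      (fun (s : Int × List Int) j =>
        if PySem.List.pyGetD s.2 j 0 = 1 then (s.1 + 1, change_locks s.2) else s)
      (((k + 1 : Nat) : Int), change_locks^[k + 1] cells)).1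
    = (cells.drop i).foldl
        (fun (ans : Int) v => if ((v ≠ 0) ↔ PySem.Int.mod ans 2 = 0) then ans + 1 else ans)
        ((k + 1 : Nat) : Int) := by
  induction m with
  | zero =>
    intro i k h
    have hi : i = cells.length := by omega
    rw [hi, PySem.List.pyRange_one_eq_nil (le_refl _), List.drop_length]
    rfl
  | succ m ih =>
    intro i k h
    have hilt : i < cells.length := by omega
    have hlt : (i : Int) < (cells.length : Int) := by exact_mod_cast hilt
    rw [PySem.List.pyRange_one_cons hlt, List.drop_eq_getElem_cons hilt]
    simp only [List.foldl_cons]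
    have hget : PySem.List.pyGetD (change_locks^[k + 1] cells) (i : Int) 0
        = pflip^[k + 1] cells[i] := by
      rw [PySem.List.pyGetD_natCast, iter_getD (k + 1) cells i hilt,
        List.getD_eq_getElem _ _ hilt]
    have hcast : ((i : Int) + 1) = ((i + 1 : Nat) : Int) := by push_cast; ring
    by_cases hhit : pflip^[k + 1] cells[i] = 1
    · have hb : ((cells[i] ≠ 0) ↔ PySem.Int.mod ((k + 1 : Nat) : Int) 2 = 0) :=
        (hit1_iff k cells[i]).mp hhit
      rw [hget, if_pos hhit, if_pos hb]
      have hstate : (((k + 1 : Nat) : Int) + 1, change_locks (change_locks^[k + 1] cells))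
          = (((k + 1 + 1 : Nat) : Int), change_locks^[k + 1 + 1] cells) := by
        rw [show change_locks (change_locks^[k + 1] cells) = change_locks^[k + 1 + 1] cells from
          (Function.iterate_succ_apply' _ _ _).symm]
        push_cast; ring_nf
      rw [hstate, hcast]
      exact ih (i + 1) (k + 1) (by omega)
    · have hb : ¬ ((cells[i] ≠ 0) ↔ PySem.Int.mod ((k + 1 : Nat) : Int) 2 = 0) :=
        fun hc => hhit ((hit1_iff k cells[i]).mpr hc)
      rw [hget, if_neg hhit, if_neg hb, hcast]
      exact ih (i + 1) k (by omega)

-- phase 1: while no prisoner is freed yet, A scans for the first literal 1,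
-- which is B's rest.index(1) search
lemma loop1_eq (cells : List Int) (m : Nat) : ∀ (i : Nat), i + m = cells.length →
    ((PySem.List.pyRange (i : Int) ((cells.length : Nat) : Int) 1).foldl
      (fun (s : Int × List Int) j =>
        if PySem.List.pyGetD s.2 j 0 = 1 then (s.1 + 1, change_locks s.2) else s)
      (0, cells)).1
    = (match PySem.List.index? (cells.drop i) 1 with
       | none => 0
       | some f =>
         ((cells.drop i).drop (f + 1)).foldl
           (fun (ans : Int) v => if ((v ≠ 0) ↔ PySem.Int.mod ans 2 = 0) then ans + 1 else ans)
           1) := by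
  induction m with
  | zero =>
    intro i h
    have hi : i = cells.length := by omega
    rw [hi, PySem.List.pyRange_one_eq_nil (le_refl _), List.drop_length]
    rfl
  | succ m ih =>
    intro i h
    have hilt : i < cells.length := by omega
    have hlt : (i : Int) < (cells.length : Int) := by exact_mod_cast hilt
    rw [PySem.List.pyRange_one_cons hlt, List.drop_eq_getElem_cons hilt]
    simp only [List.foldl_cons]
    have hget : PySem.List.pyGetD cells (i : Int) 0 = cells[i] := by
      rw [PySem.List.pyGetD_natCast, List.getD_eq_getElem _ _ hilt]
    have hcast : ((i : Int) + 1) = ((i + 1 : Nat) : Int) := by push_cast; ring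
    by_cases hone : cells[i] = 1
    · rw [hget, if_pos hone, hcast]
      rw [hone, PySem.List.index?_cons_self]
      have h2 := loop2_eq cells m (i + 1) 0 (by omega)
      simp only [Nat.cast_one, Function.iterate_one, Nat.zero_add] at h2
      simpa using h2
    · rw [hget, if_neg hone, hcast]
      rw [PySem.List.index?_cons_of_ne _ hone]
      rw [ih (i + 1) (by omega)]
      cases hfx : PySem.List.index? (cells.drop (i + 1)) 1 with
      | none => simp
      | some f =>
        simp only [Option.map_some]
        rw [List.drop_succ_cons, List.drop_drop]

-- ===== VERDICT (by name: the statement is the Claim_ definition above) =====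
theorem freed_prisoners_spec : Claim_equal_freed_prisoners := by
  intro cells _ _
  unfold Spec_freed_prisoners freed_prisoners freed_prisoners_alt
  by_cases h0 : PySem.List.pyGetD cells 0 0 = 0
  · simp [h0]
  · rw [if_neg h0, if_neg h0]
    have hne : cells ≠ [] := by
      intro hn; apply h0; rw [hn]; rfl
    have hlen : 1 ≤ cells.length := by
      cases cells with
      | nil => exact absurd rfl hne
      | cons a t => simp
    have := loop1_eq cells (cells.length - 1) 1 (by omega)
    simpa [PySem.List.len] using this
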